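-- pv_equiv track=rewrite | github.com/RyanPioneer/Leetcode | 1501~2000/1798. Maximum Number of Consecutive Values You Can Make/main.py | getMaximumConsecutive
-- ===== SOURCE A (Python) =====
-- from typing import List, Optional
--
-- def getMaximumConsecutive(coins: List[int]) -> int:
--     coins.sort()
--     max_num = 0
--     for coin in coins:
--         if coin > max_num + 1:
--             return max_num + 1
--         max_num += coin
--
--     return max_num + 1
-- ===== SOURCE B (Python) =====
-- from typing import List
--
-- def getMaximumConsecutive(coins: List[int]) -> int:
--     # Selection with early exit: never sorts; repeatedly extract the smallest
--     # remaining coin and stop at the first gap.  (Does not mutate `coins`.)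
--     rest = list(coins)
--     reach = 1  # every value in [?, reach-1] ... reach-1 is the current max makeable
--     while rest:
--         c = min(rest)
--         if c > reach:
--             return reach
--         reach += c
--         rest.remove(c)
--     return reach
-- ===== Notes on version B (the rewrite author's own statement) =====
-- stated objective: alternative
-- what changed: Replaces A's sort-then-scan with a sort-free selection loop: repeatedly extract min(rest) from a working copy, stop at the first gap; it trades the O(n log n) sort for O(n) work per extracted coin and never mutates the argument (A sorts it in place).
import Mathlib
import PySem

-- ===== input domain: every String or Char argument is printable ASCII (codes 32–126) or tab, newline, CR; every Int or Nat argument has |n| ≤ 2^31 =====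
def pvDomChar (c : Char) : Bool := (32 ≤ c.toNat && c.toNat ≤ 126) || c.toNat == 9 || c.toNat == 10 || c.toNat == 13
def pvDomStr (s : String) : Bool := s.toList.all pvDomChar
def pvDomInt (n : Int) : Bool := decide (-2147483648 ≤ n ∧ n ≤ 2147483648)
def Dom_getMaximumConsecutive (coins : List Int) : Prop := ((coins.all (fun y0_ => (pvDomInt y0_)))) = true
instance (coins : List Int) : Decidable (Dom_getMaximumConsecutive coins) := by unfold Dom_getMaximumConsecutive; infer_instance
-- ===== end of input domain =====

-- B replaces A's sort-then-scan by a sort-free selection loop (repeatedly take min(rest), stop at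
-- the first gap); equivalence is about the return value only: A sorts its argument in place,
-- B leaves it unchanged.

-- ===== PORT A =====
-- A's for-loop with early return, over the sorted list, carrying max_num
def pvLoopA : List Int → Int → Int
  | [], max_num => max_num + 1
  | coin :: rest, max_num =>
      if coin > max_num + 1 then max_num + 1 else pvLoopA rest (max_num + coin)

def getMaximumConsecutive (coins : List Int) : Int :=
  pvLoopA (PySem.List.sorted coins (fun x => x)) 0

-- ===== PORT B =====
-- B's while-loop: c = min(rest); early return at a gap; rest.remove(c).
-- Python's rest.remove(c) always succeeds here because c = min(rest) ∈ rest: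
-- PySem.List.remove? rest c = some (rest.erase c) (PySem.List.remove?_eq_some_erase).
def pvMinHelper (rest : List Int) (c : Int) (h : PySem.List.min? rest (fun x => x) = some c) :
    (rest.erase c).length < rest.length :=
  by have := PySem.List.min?_mem h; calc (rest.erase c).length < (rest.erase c).length + 1 := Nat.lt_succ_self _
    _ = rest.length := List.length_erase_add_one this

def pvLoopB (rest : List Int) (reach : Int) : Int :=
  match hm : PySem.List.min? rest (fun x => x) with
  | none => reach
  | some c =>
      if c > reach then reach
      else pvLoopB (rest.erase c) (reach + c)
termination_by rest.length
decreasing_by exact pvMinHelper rest c hm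

def getMaximumConsecutive_alt (coins : List Int) : Int :=
  pvLoopB coins 1

-- ===== PRECONDITION & SPEC =====
def Spec_getMaximumConsecutive (coins : List Int) (out : Int) : Prop := out = getMaximumConsecutive_alt coins
instance (coins : List Int) (out : Int) : Decidable (Spec_getMaximumConsecutive coins out) := by unfold Spec_getMaximumConsecutive; infer_instance

-- ===== CLAIM =====
def Claim_equal_getMaximumConsecutive : Prop := ∀ (coins : List Int), Dom_getMaximumConsecutive coins → Spec_getMaximumConsecutive coins (getMaximumConsecutive coins)

-- ===== LEMMAS AND PROOFS =====

-- sorted(l) = min(l) :: sorted(l minus that min)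
theorem sorted_cons_min (l : List Int) (c : Int)
    (hm : PySem.List.min? l (fun x => x) = some c) :
    PySem.List.sorted l (fun x => x) = c :: PySem.List.sorted (l.erase c) (fun x => x) := by
  have hcmem : c ∈ l := PySem.List.min?_mem hm
  apply PySem.List.sorted_id_eq_of_perm_of_pairwise
  · exact (((PySem.List.sorted_perm (l.erase c) (fun x => x) false).cons c)).trans
      (List.perm_cons_erase hcmem).symm
  · rw [List.pairwise_cons]
    constructor
    · intro y hy
      exact PySem.List.min?_isMin hm y
        (List.mem_of_mem_erase ((PySem.List.mem_sorted (l.erase c) (fun x => x) false y).1 hy))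
    · exact PySem.List.sorted_pairwise (l.erase c) (fun x => x)

theorem loopA_eq_loopB (n : Nat) : ∀ (l : List Int) (m : Int), l.length = n →
    pvLoopA (PySem.List.sorted l (fun x => x)) m = pvLoopB l (m + 1) := by
  induction n using Nat.strong_induction_on with
  | _ n ih =>
    intro l m hlen
    rw [pvLoopB]
    cases hm : PySem.List.min? l (fun x => x) with
    | none =>
        have : l = [] := (PySem.List.min?_eq_none_iff l (fun x => x)).1 hm
        subst this
        simp [PySem.List.sorted, pvLoopA]
    | some c =>
        rw [sorted_cons_min l c hm]
        simp only [pvLoopA]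
        split
        · rfl
        · have hlt := pvMinHelper l c hm
          have := ih (l.erase c).length (by omega) (l.erase c) (m + c) rfl
          rw [this]; ring_nf

-- ===== VERDICT =====
theorem getMaximumConsecutive_spec : Claim_equal_getMaximumConsecutive := by
  intro coins _
  unfold Spec_getMaximumConsecutive getMaximumConsecutive getMaximumConsecutive_alt
  exact loopA_eq_loopB coins.length coins 0 rfl
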